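-- pv_equiv track=rewrite | github.com/Nameko117/Hopfield | code.py | getImg
-- ===== SOURCE A (Python) =====
-- def getImg(x, n):
--     t = ""
--     for i in range(len(x)):
--         if x[i] == -1:
--             t += '○'
--         elif x[i] == 1:
--             t += '●'
--         if i%n == n-1:
--             t += '\n'
--     return t
-- ===== SOURCE B (Python) =====
-- def getImg(x, n):
--     m = {-1: '\u25cb', 1: '\u25cf'}
--     out = ''
--     rest = x
--     while rest:
--         row = ''.join(m.get(v, '') for v in rest[:n])
--         if len(rest) >= n:
--             row += '\n'
--         out += row
--         rest = rest[n:]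
--     return out
-- ===== Notes on version B (the rewrite author's own statement) =====
-- stated objective: alternative
-- what changed: B replaces A's flat index loop with a per-element modulo test by a row-chunking while loop: it slices one row of width n off the remaining suffix at a time, renders it via a symbol map, and appends a newline exactly when the chunk is full.
-- outside the precondition, e.g. on getImg([1, -1], -1): A returns '●○', B does not finish within the time limit; on getImg([1], 0): A raises ZeroDivisionError, B does not finish within the time limit
import Mathlib
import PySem

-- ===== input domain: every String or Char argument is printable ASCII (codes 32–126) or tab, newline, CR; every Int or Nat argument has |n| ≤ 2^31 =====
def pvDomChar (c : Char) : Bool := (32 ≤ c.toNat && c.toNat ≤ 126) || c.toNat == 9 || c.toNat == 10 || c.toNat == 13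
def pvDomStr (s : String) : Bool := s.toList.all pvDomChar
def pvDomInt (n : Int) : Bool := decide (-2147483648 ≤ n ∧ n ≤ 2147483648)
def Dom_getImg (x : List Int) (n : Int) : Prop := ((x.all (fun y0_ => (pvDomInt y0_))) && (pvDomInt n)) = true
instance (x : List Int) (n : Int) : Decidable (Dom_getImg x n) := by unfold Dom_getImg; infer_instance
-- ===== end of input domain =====

-- B renders the grid by a row-chunking while loop (slicing one row of width n off the rest at a time)
-- instead of A's flat index loop with a modulo test; objective: alternative decomposition, same cost.
-- Pre_ excludes n ≤ 0 with nonempty x: for n = 0 A raises ZeroDivisionError, and for n < 0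
-- A's newline test never fires only because of Python's negative modulo (B's while loop makes no progress there).


-- ===== PORT A =====
-- literal transliteration: for i in range(len(x)): append symbol, then '\n' when i % n == n-1
def getImg (x : List Int) (n : Int) : String :=
  (PySem.List.pyRange 0 (x.length : Int) 1).foldl
    (fun t i =>
      let t := if PySem.List.pyGetD x i 0 = -1 then t ++ "○"
               else if PySem.List.pyGetD x i 0 = 1 then t ++ "●"
               else t
      if PySem.Int.mod i n = n - 1 then t ++ "\n" else t)
    ""

-- ===== PORT B =====
-- the symbol map m = {-1: '○', 1: '●'} of Source B
def getImgMap : PySem.Dict Int String :=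
  (PySem.Dict.empty.insert (-1) "○").insert 1 "●"

-- Source B's while loop over the remaining suffix; the extra fuel argument only makes it total in
-- Lean (for n ≥ 1 it never runs out; Source B's loop makes no progress when n ≤ 0 and rest ≠ []).
def renderLoop (n : Int) : Nat → String → List Int → String
  | _, out, [] => out
  | 0, out, _ :: _ => out
  | fuel + 1, out, v :: rest =>
      let seg := v :: rest
      let row := (PySem.List.slice seg none (some n)).foldl
                   (fun r w => r ++ getImgMap.getD w "") ""
      let row := if n ≤ (seg.length : Int) then row ++ "\n" else row
      renderLoop n fuel (out ++ row) (PySem.List.slice seg (some n) none)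

def getImg_alt (x : List Int) (n : Int) : String :=
  renderLoop n (x.length + 1) "" x

-- ===== PRECONDITION & SPEC =====
-- Pre_ excludes nonempty x with n ≤ 0: at n = 0 A raises ZeroDivisionError; at n < 0 A's
-- no-newline output is an artefact of Python's negative modulo and B's recursion does not terminate there.
def Pre_getImg (x : List Int) (n : Int) : Prop := x = [] ∨ 1 ≤ n
instance (x : List Int) (n : Int) : Decidable (Pre_getImg x n) := by unfold Pre_getImg; infer_instance

def pvWitness_getImg : List Int × Int := ([1, -1, 1, 0], 2)

def Spec_getImg (x : List Int) (n : Int) (out : String) : Prop := out = getImg_alt x n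
instance (x : List Int) (n : Int) (out : String) : Decidable (Spec_getImg x n out) := by unfold Spec_getImg; infer_instance

-- ===== CLAIM (what is proved, stated in full; the proofs are below) =====
def Claim_equal_getImg : Prop := ∀ (x : List Int) (n : Int), Dom_getImg x n → Pre_getImg x n → Spec_getImg x n (getImg x n)

-- ===== LEMMAS AND PROOFS =====

-- the symbol A appends for a value (also what B's dict lookup yields)
def symStr (v : Int) : String := if v = -1 then "○" else if v = 1 then "●" else ""

-- the one-index contribution of A's loop body, with the index and width as naturals
def gN (seg : List Int) (N : Nat) (k : Nat) : String :=
  symStr (seg.getD k 0) ++ (if k % N = N - 1 then "\n" else "")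

lemma foldl_sappend (l : List String) (t : String) :
    l.foldl (· ++ ·) t = t ++ l.foldl (· ++ ·) "" := by
  induction l generalizing t with
  | nil => simp
  | cons a l ih =>
      rw [List.foldl_cons, List.foldl_cons, ih (t ++ a), ih ("" ++ a),
        String.empty_append, String.append_assoc]

lemma join_cons (a : String) (l : List String) :
    String.join (a :: l) = a ++ String.join l := by
  show (a :: l).foldl (· ++ ·) "" = _
  rw [List.foldl_cons, String.empty_append, foldl_sappend]
  rfl

lemma join_append (l₁ l₂ : List String) :
    String.join (l₁ ++ l₂) = String.join l₁ ++ String.join l₂ := by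
  induction l₁ with
  | nil => simp [String.join]
  | cons a l ih => simp [join_cons, ih, String.append_assoc]

lemma foldl_append_join {α : Type} (g : α → String) (l : List α) (t : String) :
    l.foldl (fun a i => a ++ g i) t = t ++ String.join (l.map g) := by
  induction l generalizing t with
  | nil => simp [String.join]
  | cons a l ih => rw [List.map_cons, join_cons, List.foldl_cons, ih, String.append_assoc]

-- B's dict lookup is A's if-chain
lemma getD_sym (w : Int) : getImgMap.getD w "" = symStr w := by
  unfold getImgMap symStr
  by_cases h1 : w = 1
  · subst h1
    rw [PySem.Dict.getD_insert_self]
    simp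
  · rw [PySem.Dict.getD_insert_of_ne _ _ _ h1]
    by_cases h2 : w = -1
    · subst h2
      rw [PySem.Dict.getD_insert_self]
      simp
    · rw [PySem.Dict.getD_insert_of_ne _ _ _ h2, if_neg h2, if_neg h1]
      rfl

-- A's flat loop is the join of its per-index contributions
lemma getImg_eq_join (x : List Int) (N : Nat) (hN : 1 ≤ N) :
    getImg x (N : Int) = String.join ((List.range x.length).map (gN x N)) := by
  unfold getImg
  rw [PySem.List.pyRange_zero, Int.toNat_natCast, List.foldl_map]
  have hstep : (fun (t : String) (k : Nat) =>
      let t' := if PySem.List.pyGetD x (k : Int) 0 = -1 then t ++ "○"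
                else if PySem.List.pyGetD x (k : Int) 0 = 1 then t ++ "●" else t
      if PySem.Int.mod (k : Int) (N : Int) = (N : Int) - 1 then t' ++ "\n" else t')
      = fun t k => t ++ gN x N k := by
    funext t k
    simp only [PySem.List.pyGetD_natCast, PySem.Int.mod_natCast, gN, symStr]
    split_ifs with h1 h2 h3 h4 h5 h6 h7 <;>
      first
        | omega
        | simp [String.append_assoc, String.append_empty]
  rw [hstep, foldl_append_join, String.empty_append]

lemma getD_drop (seg : List Int) (N k : Nat) :
    (seg.drop N).getD k 0 = seg.getD (N + k) 0 := by
  rw [List.getD_eq_getElem?_getD, List.getD_eq_getElem?_getD, List.getElem?_drop]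

lemma gN_shift (seg : List Int) (N k : Nat) :
    gN seg N (N + k) = gN (seg.drop N) N k := by
  unfold gN
  rw [getD_drop, Nat.add_mod_left]

lemma map_sym_take (x : List Int) (N : Nat) (hN : N ≤ x.length) :
    (x.take N).map symStr = (List.range N).map (fun k => symStr (x.getD k 0)) := by
  apply List.ext_getElem
  · simp [hN]
  · intro i h1 h2
    simp only [List.getElem_map, List.getElem_take, List.getElem_range]
    rw [List.getD_eq_getElem x 0 (by simp at h1; omega)]

-- one full chunk of A's contributions is one of B's rows plus its newline
lemma chunk_join (seg : List Int) (N : Nat) (hN : 1 ≤ N) (hL : N ≤ seg.length) :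
    String.join ((List.range N).map (gN seg N)) = String.join ((seg.take N).map symStr) ++ "\n" := by
  obtain ⟨M, rfl⟩ : ∃ M, N = M + 1 := ⟨N - 1, by omega⟩
  rw [map_sym_take seg (M + 1) hL, List.range_succ, List.map_append, List.map_append,
    join_append, join_append]
  have h1 : (List.range M).map (gN seg (M + 1))
      = (List.range M).map (fun k => symStr (seg.getD k 0)) := by
    apply List.map_congr_left
    intro k hk
    rw [List.mem_range] at hk
    unfold gN
    rw [Nat.mod_eq_of_lt (by omega), if_neg (by omega), String.append_empty]
  have h2 : gN seg (M + 1) M = symStr (seg.getD M 0) ++ "\n" := by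
    unfold gN
    rw [Nat.mod_eq_of_lt (by omega), if_pos (by omega)]
  simp only [h1, List.map_cons, List.map_nil, h2, String.join]
  simp [String.append_assoc]

lemma renderLoop_eq (N : Nat) (hN : 1 ≤ N) :
    ∀ (fuel : Nat) (out : String) (seg : List Int), seg.length ≤ fuel →
      renderLoop (N : Int) fuel out seg
        = out ++ String.join ((List.range seg.length).map (gN seg N)) := by
  intro fuel
  induction fuel with
  | zero =>
      intro out seg h
      obtain rfl : seg = [] := by
        cases seg with
        | nil => rfl
        | cons v rest => simp at h
      simp [renderLoop, String.join]
  | succ fuel ih =>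
      intro out seg hlen
      cases seg with
      | nil => simp [renderLoop, String.join]
      | cons v rest =>
        rw [renderLoop]
        rw [PySem.List.slice_to_natCast, PySem.List.slice_from_natCast, foldl_append_join,
          String.empty_append]
        have hmap : ((v :: rest).take N).map (fun w => getImgMap.getD w "")
            = ((v :: rest).take N).map symStr := by
          apply List.map_congr_left
          intro w _
          exact getD_sym w
        rw [hmap]
        by_cases hc : N ≤ (v :: rest).length
        · rw [if_pos (by exact_mod_cast Nat.cast_le.mpr hc)]
          rw [ih _ ((v :: rest).drop N) (by simp at hlen ⊢; omega)]
          have hsplit : (v :: rest).length = N + ((v :: rest).length - N) := by omega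
          conv_rhs => rw [hsplit, List.range_add, List.map_append, join_append]
          rw [chunk_join (v :: rest) N hN hc]
          have hshift : (List.map (fun k => N + k) (List.range ((v :: rest).length - N))).map (gN (v :: rest) N)
              = (List.range ((v :: rest).length - N)).map (gN ((v :: rest).drop N) N) := by
            rw [List.map_map]
            apply List.map_congr_left
            intro k _
            exact gN_shift (v :: rest) N k
          rw [hshift, List.length_drop, String.append_assoc]
        · have hlt : (v :: rest).length < N := by omega
          rw [if_neg (by omega)]
          have hdrop : (v :: rest).drop N = [] := List.drop_eq_nil_of_le (by omega)
          rw [hdrop]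
          have hrr : ∀ s, renderLoop (N : Int) fuel s [] = s := by
            intro s; cases fuel <;> simp [renderLoop]
          rw [hrr, List.take_of_length_le (by omega)]
          have hcongr : (List.range (v :: rest).length).map (gN (v :: rest) N)
              = (List.range (v :: rest).length).map (fun k => symStr ((v :: rest).getD k 0)) := by
            apply List.map_congr_left
            intro k hk
            rw [List.mem_range] at hk
            unfold gN
            rw [Nat.mod_eq_of_lt (by omega), if_neg (by omega), String.append_empty]
          rw [hcongr, ← map_sym_take (v :: rest) (v :: rest).length le_rfl,
            List.take_of_length_le le_rfl]

-- ===== VERDICT (by name: the statement is the Claim_ definition above) =====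
theorem getImg_spec : Claim_equal_getImg := by
  intro x n _ hpre
  show getImg x n = getImg_alt x n
  rcases hpre with h | h
  · subst h; rfl
  · have hcast : n = ((n.toNat : Nat) : Int) := by omega
    have hN : 1 ≤ n.toNat := by omega
    rw [hcast, getImg_eq_join x n.toNat hN, getImg_alt,
      renderLoop_eq n.toNat hN (x.length + 1) "" x (by omega), String.empty_append]
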